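-- pv_equiv track=rewrite | github.com/Ambro19/youtube-trans-downloader-api | transcript_fetcher.py | _clean_plain_blocks
-- ===== SOURCE A (Python) =====
-- from typing import Optional, List, Dict, Any, Iterable
--
-- def _clean_plain_blocks(blocks: List[str]) -> str:
--     """Format plain text into readable paragraphs."""
--     out, cur, chars = [], [], 0
--     for w in " ".join(blocks).split():
--         cur.append(w)
--         chars += len(w) + 1
--         if chars > 400 and w[-1:] in ".!?":
--             out.append(" ".join(cur))
--             cur, chars = [], 0
--     if cur:
--         out.append(" ".join(cur))
--     return "\n\n".join(out)
-- ===== SOURCE B (Python) =====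
-- def _clean_plain_blocks(blocks):
--     """Format plain text into readable paragraphs (sentence-grouping + greedy packing)."""
--     words = " ".join(blocks).split()
--     # pass 1: group words into sentences (a sentence ends at a word whose last char is . ! or ?)
--     sentences, cur = [], []
--     for w in words:
--         cur.append(w)
--         if w[-1:] in ".!?":
--             sentences.append(cur)
--             cur = []
--     tail = cur  # trailing unterminated words
--     # pass 2: greedily pack whole sentences into paragraphs of > 400 chars
--     paras, buf, n = [], [], 0
--     for s in sentences:
--         buf = buf + s
--         n += sum(len(w) + 1 for w in s)
--         if n > 400:
--             paras.append(" ".join(buf))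
--             buf, n = [], 0
--     buf = buf + tail
--     if buf:
--         paras.append(" ".join(buf))
--     return "\n\n".join(paras)
-- ===== Notes on version B (the rewrite author's own statement) =====
-- stated objective: alternative
-- what changed: Single fused word loop with a char counter is replaced by a two-pass decomposition: first group words into sentence units (ending at words whose last char is .!?), then greedily pack whole sentence units into >400-char paragraphs, flushing the trailing unterminated words at the end.
import Mathlib
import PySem

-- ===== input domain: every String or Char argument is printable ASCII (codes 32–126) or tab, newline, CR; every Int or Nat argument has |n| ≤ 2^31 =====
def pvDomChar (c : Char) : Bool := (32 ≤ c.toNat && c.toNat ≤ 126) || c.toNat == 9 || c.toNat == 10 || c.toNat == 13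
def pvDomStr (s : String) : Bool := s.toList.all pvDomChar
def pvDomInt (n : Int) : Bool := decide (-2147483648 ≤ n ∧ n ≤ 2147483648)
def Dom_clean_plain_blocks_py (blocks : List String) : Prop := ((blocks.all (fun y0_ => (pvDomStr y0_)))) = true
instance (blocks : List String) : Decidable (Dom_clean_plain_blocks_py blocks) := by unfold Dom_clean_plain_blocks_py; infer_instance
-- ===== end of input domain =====

-- B replaces A's fused word loop by a two-pass decomposition (sentence grouping, then greedy
-- paragraph packing); same cost, proved to return the same string.

-- shared helper: both Pythons' test  w[-1:] in ".!?"
def pvIsEnd (w : String) : Bool := PySem.Str.isIn (PySem.Str.slice w (some (-1)) none) ".!?"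

-- ===== PORT A =====
def pvStepA (acc : List String × List String × Int) (w : String) :
    List String × List String × Int :=
  let cur := acc.2.1 ++ [w]
  let chars := acc.2.2 + PySem.Str.len w + 1
  if 400 < chars ∧ pvIsEnd w = true then (acc.1 ++ [PySem.Str.join " " cur], [], 0)
  else (acc.1, cur, chars)

def clean_plain_blocks_py (blocks : List String) : String :=
  let st := (PySem.Str.split₀ (PySem.Str.join " " blocks)).foldl pvStepA ([], [], 0)
  let out := if st.2.1 ≠ [] then st.1 ++ [PySem.Str.join " " st.2.1] else st.1
  PySem.Str.join "\n\n" out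

-- ===== PORT B =====
-- sum(len(w) + 1 for w in s)
def pvWt (s : List String) : Int := (s.map (fun w => PySem.Str.len w + 1)).sum

-- pass 1: group words into sentences
def pvStep1 (acc : List (List String) × List String) (w : String) :
    List (List String) × List String :=
  let cur := acc.2 ++ [w]
  if pvIsEnd w then (acc.1 ++ [cur], []) else (acc.1, cur)

-- pass 2: greedily pack sentences into paragraphs
def pvStep2 (acc : List String × List String × Int) (s : List String) :
    List String × List String × Int :=
  let buf := acc.2.1 ++ s
  let n := acc.2.2 + pvWt s
  if 400 < n then (acc.1 ++ [PySem.Str.join " " buf], [], 0) else (acc.1, buf, n)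

def clean_plain_blocks_py_alt (blocks : List String) : String :=
  let words := PySem.Str.split₀ (PySem.Str.join " " blocks)
  let p := words.foldl pvStep1 ([], [])          -- (sentences, tail)
  let q := p.1.foldl pvStep2 ([], [], 0)         -- (paras, buf, n)
  let buf := q.2.1 ++ p.2
  let paras := if buf ≠ [] then q.1 ++ [PySem.Str.join " " buf] else q.1
  PySem.Str.join "\n\n" paras

-- ===== PRECONDITION & SPEC =====
def Spec_clean_plain_blocks_py (blocks : List String) (out : String) : Prop := out = clean_plain_blocks_py_alt blocks
instance (blocks : List String) (out : String) : Decidable (Spec_clean_plain_blocks_py blocks out) := by unfold Spec_clean_plain_blocks_py; infer_instance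

-- ===== CLAIM (what is proved, stated in full; the proofs are below) =====
def Claim_equal_clean_plain_blocks_py : Prop := ∀ (blocks : List String), Dom_clean_plain_blocks_py blocks → Spec_clean_plain_blocks_py blocks (clean_plain_blocks_py blocks)

-- ===== LEMMAS AND PROOFS =====

lemma pvWt_nil : pvWt [] = 0 := rfl

lemma pvWt_snoc (cs : List String) (w : String) :
    pvWt (cs ++ [w]) = pvWt cs + (PySem.Str.len w + 1) := by
  simp [pvWt]

lemma pvWt_append (a b : List String) : pvWt (a ++ b) = pvWt a + pvWt b := by
  simp [pvWt]

-- pass 1 accumulates its already-finished sentences on the left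
lemma pvStep1_acc (ws : List String) : ∀ (ss : List (List String)) (cur : List String),
    ws.foldl pvStep1 (ss, cur) =
      (ss ++ (ws.foldl pvStep1 ([], cur)).1, (ws.foldl pvStep1 ([], cur)).2) := by
  induction ws with
  | nil => intro ss cur; simp
  | cons w ws ih =>
      intro ss cur
      by_cases h : pvIsEnd w = true
      · simp only [List.foldl_cons, pvStep1, h, if_true, List.nil_append]
        rw [ih (ss ++ [cur ++ [w]]) [], ih [cur ++ [w]] []]
        simp
      · have h' : pvIsEnd w = false := by simpa using h
        simp only [List.foldl_cons, pvStep1, h', Bool.false_eq_true, if_false, List.nil_append]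
        exact ih ss (cur ++ [w])

-- the key correspondence between A's fused loop and B's two passes
lemma pv_main (ws : List String) : ∀ (out buf cur : List String),
    ws.foldl pvStepA (out, buf ++ cur, pvWt buf + pvWt cur) =
      (((ws.foldl pvStep1 ([], cur)).1.foldl pvStep2 (out, buf, pvWt buf)).1,
       ((ws.foldl pvStep1 ([], cur)).1.foldl pvStep2 (out, buf, pvWt buf)).2.1
         ++ (ws.foldl pvStep1 ([], cur)).2,
       ((ws.foldl pvStep1 ([], cur)).1.foldl pvStep2 (out, buf, pvWt buf)).2.2
         + pvWt (ws.foldl pvStep1 ([], cur)).2) := by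
  induction ws with
  | nil => intro out buf cur; simp
  | cons w ws ih =>
      intro out buf cur
      rw [List.foldl_cons, List.foldl_cons]
      by_cases hend : pvIsEnd w = true
      · -- w closes the sentence s = cur ++ [w]
        have h1 : pvStep1 ([], cur) w = ([cur ++ [w]], []) := by
          simp [pvStep1, hend]
        by_cases hgt : 400 < pvWt buf + pvWt cur + PySem.Str.len w + 1
        · -- A emits here; B's pass 2 emits on this sentence
          have hA : pvStepA (out, buf ++ cur, pvWt buf + pvWt cur) w
              = (out ++ [PySem.Str.join " " (buf ++ cur ++ [w])], [], 0) := by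
            simp [pvStepA, hend]
            all_goals
              have hgtn : (400 : Int) < pvWt buf + pvWt cur + (w.length : Int) + 1 := by
                simpa using hgt
              omega
          have h2 : pvStep2 (out, buf, pvWt buf) (cur ++ [w])
              = (out ++ [PySem.Str.join " " (buf ++ cur ++ [w])], [], 0) := by
            simp only [pvStep2]
            rw [if_pos (by rw [pvWt_snoc]; omega)]
            simp
          rw [hA, h1, pvStep1_acc ws [cur ++ [w]] [], List.foldl_append,
              List.foldl_cons, List.foldl_nil, h2]
          have h3 := ih (out ++ [PySem.Str.join " " (buf ++ cur ++ [w])]) [] []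
          simp only [List.append_nil, pvWt_nil, Int.add_zero] at h3
          exact h3
        · -- sentence complete but the paragraph is not yet long enough
          have hA : pvStepA (out, buf ++ cur, pvWt buf + pvWt cur) w
              = (out, buf ++ cur ++ [w], pvWt buf + pvWt cur + PySem.Str.len w + 1) := by
            simp [pvStepA]
            all_goals
              intro h
              exfalso
              have hgtn : ¬ (400 : Int) < pvWt buf + pvWt cur + (w.length : Int) + 1 := by
                simpa using hgt
              omega
          have h2 : pvStep2 (out, buf, pvWt buf) (cur ++ [w])
              = (out, buf ++ (cur ++ [w]), pvWt (buf ++ (cur ++ [w]))) := by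
            simp only [pvStep2]
            rw [if_neg (by rw [pvWt_snoc]; omega), ← pvWt_append]
          rw [hA, h1, pvStep1_acc ws [cur ++ [w]] [], List.foldl_append,
              List.foldl_cons, List.foldl_nil, h2,
              show buf ++ cur ++ [w] = buf ++ (cur ++ [w]) by simp,
              show pvWt buf + pvWt cur + PySem.Str.len w + 1 = pvWt (buf ++ (cur ++ [w])) by
                rw [pvWt_append, pvWt_snoc]; ring]
          have h3 := ih out (buf ++ (cur ++ [w])) []
          simp only [List.append_nil, pvWt_nil, Int.add_zero] at h3
          exact h3
      · -- w does not close a sentence: A cannot emit, both sides extend cur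
        have hend' : pvIsEnd w = false := by simpa using hend
        have hA : pvStepA (out, buf ++ cur, pvWt buf + pvWt cur) w
            = (out, buf ++ cur ++ [w], pvWt buf + pvWt cur + PySem.Str.len w + 1) := by
          simp [pvStepA, hend']
        have h1 : pvStep1 ([], cur) w = ([], cur ++ [w]) := by
          simp [pvStep1, hend']
        rw [hA, h1,
            show buf ++ cur ++ [w] = buf ++ (cur ++ [w]) by simp,
            show pvWt buf + pvWt cur + PySem.Str.len w + 1 = pvWt buf + pvWt (cur ++ [w]) by
              rw [pvWt_snoc]; ring]
        exact ih out buf (cur ++ [w])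

-- ===== VERDICT (by name: the statement is the Claim_ definition above) =====
theorem clean_plain_blocks_py_spec : Claim_equal_clean_plain_blocks_py := by
  intro blocks _
  unfold Spec_clean_plain_blocks_py clean_plain_blocks_py clean_plain_blocks_py_alt
  have h := pv_main (PySem.Str.split₀ (PySem.Str.join " " blocks)) [] [] []
  simp only [List.append_nil, pvWt_nil, Int.add_zero] at h
  simp only [h]
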